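-- pv_equiv track=rewrite | github.com/jimdawdy-hub/codeplugger | codeplug/brandmeister.py | build_repeater_index
-- ===== SOURCE A (Python) =====
-- def build_repeater_index(devices: list[dict]) -> dict[str, list[dict]]:
--     """
--     Return callsign → [device records] for actual repeaters only (tx != rx).
--     Hotspots (tx == rx) are excluded.
--     """
--     index: dict[str, list[dict]] = {}
--     for d in devices:
--         cs = (d.get("callsign") or "").upper().strip()
--         if not cs:
--             continue
--         if d.get("tx", "") == d.get("rx", ""):
--             continue  # simplex / hotspot
--         index.setdefault(cs, []).append(d)
--     return index
-- ===== SOURCE B (Python) =====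
-- def _repeater_key(d):
--     cs = (d.get("callsign") or "").upper().strip()
--     if not cs or d.get("tx", "") == d.get("rx", ""):
--         return None
--     return cs
--
--
-- def build_repeater_index(devices):
--     pairs = []
--     for d in devices:
--         k = _repeater_key(d)
--         if k is not None:
--             pairs.append((k, d))
--     keys = list(dict.fromkeys(k for k, _ in pairs))
--     return {k: [d for c, d in pairs if c == k] for k in keys}
-- ===== Notes on version B (the rewrite author's own statement) =====
-- stated objective: alternative
-- what changed: Replaces the incremental dict setdefault/append loop by a filter-then-group pipeline: one pass extracts (callsign, device) pairs, keys are deduped in first-occurrence order, and each group is gathered by a per-key scan of the pair list.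
import Mathlib
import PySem

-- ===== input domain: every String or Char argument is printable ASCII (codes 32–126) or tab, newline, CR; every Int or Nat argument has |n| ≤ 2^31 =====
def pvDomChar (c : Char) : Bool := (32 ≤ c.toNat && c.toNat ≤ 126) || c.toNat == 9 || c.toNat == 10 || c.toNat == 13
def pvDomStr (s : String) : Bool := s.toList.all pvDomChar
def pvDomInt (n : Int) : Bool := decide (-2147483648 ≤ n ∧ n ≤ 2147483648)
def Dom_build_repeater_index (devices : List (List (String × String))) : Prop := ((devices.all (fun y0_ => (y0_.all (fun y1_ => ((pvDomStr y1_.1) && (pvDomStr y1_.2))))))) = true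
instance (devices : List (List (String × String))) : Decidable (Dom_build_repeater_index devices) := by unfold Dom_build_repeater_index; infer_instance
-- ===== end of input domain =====

-- B replaces A's incremental setdefault/append dict loop by a filter-then-group pipeline
-- (extract (callsign, device) pairs, dedup keys in first-occurrence order, gather each
-- group by a per-key scan): an alternative decomposition, same return value.


-- ===== PORT A =====
-- setdefault(cs, []).append(d) on an association-list dict = modify cs [] (· ++ [d])
def build_repeater_index (devices : List (List (String × String))) : List (String × List (List (String × String))) :=
  (devices.foldl (fun index d =>
      let cs := PySem.Str.strip (PySem.Str.upper (((PySem.Dict.mk d).get? "callsign").getD ""))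
      if cs == "" then index
      else if (PySem.Dict.mk d).getD "tx" "" == (PySem.Dict.mk d).getD "rx" "" then index
      else index.modify cs [] (· ++ [d]))
    PySem.Dict.empty).items

-- ===== PORT B =====
def repeaterKey? (d : List (String × String)) : Option String :=
  let cs := PySem.Str.strip (PySem.Str.upper (((PySem.Dict.mk d).get? "callsign").getD ""))
  if cs == "" || (PySem.Dict.mk d).getD "tx" "" == (PySem.Dict.mk d).getD "rx" "" then none
  else some cs

def build_repeater_index_alt (devices : List (List (String × String))) : List (String × List (List (String × String))) :=
  let pairs := devices.foldl (fun acc d =>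
      match repeaterKey? d with
      | some k => acc ++ [(k, d)]
      | none => acc) []
  let keys := PySem.List.dedup (pairs.map (·.1))
  keys.map (fun k => (k, (pairs.filter (fun p => p.1 == k)).map (·.2)))

-- ===== PRECONDITION & SPEC =====
def Spec_build_repeater_index (devices : List (List (String × String))) (out : List (String × List (List (String × String)))) : Prop := out = build_repeater_index_alt devices
instance (devices : List (List (String × String))) (out : List (String × List (List (String × String)))) : Decidable (Spec_build_repeater_index devices out) := by unfold Spec_build_repeater_index; infer_instance

-- ===== CLAIM (what is proved, stated in full; the proofs are below) =====
def Claim_equal_build_repeater_index : Prop := ∀ (devices : List (List (String × String))), Dom_build_repeater_index devices → Spec_build_repeater_index devices (build_repeater_index devices)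

-- ===== LEMMAS AND PROOFS =====

-- the pair-collecting fold is filterMap
theorem pairs_eq_filterMap (devices : List (List (String × String)))
    (acc : List (String × List (String × String))) :
    devices.foldl (fun acc d =>
      match repeaterKey? d with
      | some k => acc ++ [(k, d)]
      | none => acc) acc
    = acc ++ devices.filterMap (fun d => (repeaterKey? d).map (fun k => (k, d))) := by
  induction devices generalizing acc with
  | nil => simp
  | cons d rest ih =>
    simp only [List.foldl_cons, List.filterMap_cons]
    cases repeaterKey? d <;> simp [ih]

-- A's loop body as a match on repeaterKey?
theorem stepA_eq (d : List (String × String))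
    (index : PySem.Dict String (List (List (String × String)))) :
    (let cs := PySem.Str.strip (PySem.Str.upper (((PySem.Dict.mk d).get? "callsign").getD ""))
      if cs == "" then index
      else if (PySem.Dict.mk d).getD "tx" "" == (PySem.Dict.mk d).getD "rx" "" then index
      else index.modify cs [] (· ++ [d]))
    = match repeaterKey? d with
      | some k => index.modify k [] (· ++ [d])
      | none => index := by
  simp only [repeaterKey?]
  cases h1 : (PySem.Str.strip (PySem.Str.upper (((PySem.Dict.mk d).get? "callsign").getD "")) == "")
  · cases h2 : ((PySem.Dict.mk d).getD "tx" "" == (PySem.Dict.mk d).getD "rx" "")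
    · simp only [h1, h2, Bool.or_self, Bool.false_eq_true, if_false]
    · simp only [h1, h2, Bool.or_true, Bool.false_eq_true, if_false, if_true]
  · simp only [h1, Bool.true_or, if_true]

-- A's fold is the grouping fold over the filtered pairs
theorem foldA_eq_foldPairs (devices : List (List (String × String)))
    (d0 : PySem.Dict String (List (List (String × String)))) :
    devices.foldl (fun index d =>
      let cs := PySem.Str.strip (PySem.Str.upper (((PySem.Dict.mk d).get? "callsign").getD ""))
      if cs == "" then index
      else if (PySem.Dict.mk d).getD "tx" "" == (PySem.Dict.mk d).getD "rx" "" then index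
      else index.modify cs [] (· ++ [d])) d0
    = (devices.filterMap (fun d => (repeaterKey? d).map (fun k => (k, d)))).foldl
        (fun g p => g.modify p.1 [] (· ++ [p.2])) d0 := by
  induction devices generalizing d0 with
  | nil => rfl
  | cons d rest ih =>
    simp only [List.foldl_cons, List.filterMap_cons]
    rw [stepA_eq]
    cases repeaterKey? d
    · simp only [Option.map_none]
      exact ih _
    · simp only [Option.map_some, List.foldl_cons]
      exact ih _

theorem build_repeater_index_spec' (devices : List (List (String × String))) :
    build_repeater_index devices = build_repeater_index_alt devices := by
  unfold build_repeater_index build_repeater_index_alt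
  rw [pairs_eq_filterMap, List.nil_append, foldA_eq_foldPairs]
  set pairs := devices.filterMap (fun d => (repeaterKey? d).map (fun k => (k, d))) with hp
  set G := pairs.foldl (fun g p => g.modify p.1 [] (· ++ [p.2])) PySem.Dict.empty with hG
  have hnd : G.keys.Nodup := by
    rw [hG]
    exact PySem.Dict.nodup_keys_foldl_modify_key pairs (·.1) [] (fun _ p => (· ++ [p.2]))
      PySem.Dict.empty PySem.Dict.nodup_keys_empty
  have hkeys : G.keys = PySem.List.dedup (pairs.map (·.1)) := by
    rw [hG, PySem.Dict.keys_foldl_modify_key]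
    simp [PySem.Set.update, PySem.Dict.keys_empty, PySem.List.dedup_eq_ofList,
      PySem.Set.ofList_eq_foldl]
  rw [PySem.Dict.items_eq_map_keys G hnd [], hkeys]
  refine List.map_congr_left (fun k _ => ?_)
  have : G.getD k [] = (pairs.filter (fun p => p.1 == k)).map (·.2) := by
    rw [hG, PySem.Dict.getD_foldl_modify_append]
    simp [PySem.Dict.getD_empty]
  rw [this]

-- ===== VERDICT (by name: the statement is the Claim_ definition above) =====
theorem build_repeater_index_spec : Claim_equal_build_repeater_index := by
  intro devices _
  exact build_repeater_index_spec' devices
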